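-- pv_equiv track=rewrite | github.com/VickiYCap/AI-Document-to-Presentation-Test | backend/extractor.py | _tail_words_by_chars
-- ===== SOURCE A (Python) =====
-- from typing import List, Iterator
-- from typing import Iterator, List
--
-- def _tail_words_by_chars(words: List[str], budget: int) -> List[str]:
--     tail: List[str] = []
--     total = 0
--     for word in reversed(words):
--         add = len(word) + (1 if tail else 0)
--         if total + add > budget:
--             break
--         tail.append(word)
--         total += add
--     tail.reverse()
--     return tail
-- ===== SOURCE B (Python) =====
-- from typing import List
--
--
-- def _tail_words_by_chars(words: List[str], budget: int) -> List[str]: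
--     # Cumulative cost of keeping the last j words: sum of their lengths + (j-1) separators.
--     costs = []
--     acc = 0
--     for w in reversed(words):
--         acc += len(w) + 1
--         costs.append(acc)  # cost of last j words is costs[j-1] - 1
--     k = sum(1 for c in costs if c <= budget + 1)
--     return words[len(words) - k:]
-- ===== Notes on version B (the rewrite author's own statement) =====
-- stated objective: alternative
-- what changed: Replaces the reversed append-and-break loop that builds the tail list (then reverses it) by a cumulative suffix-cost table: costs of keeping the last j words are accumulated once, the number k of affordable trailing words is counted against budget+1, and the result is the direct slice words[len(words)-k:].
import Mathlib
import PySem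

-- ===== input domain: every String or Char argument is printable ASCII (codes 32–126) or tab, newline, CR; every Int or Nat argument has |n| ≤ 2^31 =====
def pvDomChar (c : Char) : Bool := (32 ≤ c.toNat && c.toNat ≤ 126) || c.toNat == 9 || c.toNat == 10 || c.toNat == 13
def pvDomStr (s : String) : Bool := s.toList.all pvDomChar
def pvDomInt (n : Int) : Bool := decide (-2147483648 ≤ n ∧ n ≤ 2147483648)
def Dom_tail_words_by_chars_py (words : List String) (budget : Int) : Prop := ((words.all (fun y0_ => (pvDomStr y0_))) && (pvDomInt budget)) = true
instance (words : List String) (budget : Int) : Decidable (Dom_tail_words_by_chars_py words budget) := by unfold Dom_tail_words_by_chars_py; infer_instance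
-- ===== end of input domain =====

-- B replaces A's reversed append-and-break loop by a cumulative suffix-cost table, a count
-- of affordable trailing words and a direct slice (objective: alternative, same O(n) cost).

-- ===== PORT A =====
-- the for-loop over reversed(words) with its early break, carrying (tail, total)
def tailLoopA (budget : Int) : List String → List String → Int → List String
  | [], tail, _ => tail
  | w :: ws, tail, total =>
    let add : Int := PySem.Str.len w + (if tail = [] then 0 else 1)
    if budget < total + add then tail
    else tailLoopA budget ws (tail ++ [w]) (total + add)

def tail_words_by_chars_py (words : List String) (budget : Int) : List String :=
  (tailLoopA budget words.reverse [] 0).reverse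

-- ===== PORT B =====
-- the accumulation loop building the cost table (acc, costs)
def accumB : Int → List Int → List Int
  | _, [] => []
  | acc, x :: xs => (acc + x) :: accumB (acc + x) xs

def tail_words_by_chars_py_alt (words : List String) (budget : Int) : List String :=
  let costs := accumB 0 (words.reverse.map (fun w => PySem.Str.len w + 1))
  let k : Nat := costs.countP (fun c => decide (c ≤ budget + 1))
  PySem.List.slice words (some ((words.length : Int) - (k : Int))) none

-- ===== PRECONDITION & SPEC =====
def Spec_tail_words_by_chars_py (words : List String) (budget : Int) (out : List String) : Prop := out = tail_words_by_chars_py_alt words budget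
instance (words : List String) (budget : Int) (out : List String) : Decidable (Spec_tail_words_by_chars_py words budget out) := by unfold Spec_tail_words_by_chars_py; infer_instance

-- ===== CLAIM (what is proved, stated in full; the proofs are below) =====
def Claim_equal_tail_words_by_chars_py : Prop := ∀ (words : List String) (budget : Int), Dom_tail_words_by_chars_py words budget → Spec_tail_words_by_chars_py words budget (tail_words_by_chars_py words budget)

-- ===== LEMMAS AND PROOFS =====

theorem accumB_length (a : Int) (l : List Int) : (accumB a l).length = l.length := by
  induction l generalizing a with
  | nil => rfl
  | cons x xs ih => simp [accumB, ih]

-- every entry of accumB a l exceeds a when all increments are ≥ 1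
theorem accumB_gt (a : Int) (l : List Int) (hl : ∀ x ∈ l, 1 ≤ x) :
    ∀ c ∈ accumB a l, a < c := by
  induction l generalizing a with
  | nil => simp [accumB]
  | cons x xs ih =>
    intro c hc
    simp only [accumB, List.mem_cons] at hc
    rcases hc with rfl | hc
    · have := hl x (by simp); omega
    · have := ih (a + x) (fun y hy => hl y (by simp [hy])) c hc
      have := hl x (by simp); omega

-- count of affordable costs unfolds like A's loop condition (uses monotonicity for the break case)
theorem countP_accumB_cons (B a x : Int) (xs : List Int) (hxs : ∀ y ∈ xs, 1 ≤ y) :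
    (accumB a (x :: xs)).countP (fun c => decide (c ≤ B)) =
      if a + x ≤ B then 1 + (accumB (a + x) xs).countP (fun c => decide (c ≤ B)) else 0 := by
  simp only [accumB, List.countP_cons]
  by_cases h : a + x ≤ B
  · simp [h]; omega
  · have hz : (accumB (a + x) xs).countP (fun c => decide (c ≤ B)) = 0 := by
      rw [List.countP_eq_zero]
      intro c hc
      have := accumB_gt (a + x) xs hxs c hc
      simp only [decide_eq_true_eq]; omega
    simp [hz, h]

theorem len_ge_one (w : String) : 1 ≤ PySem.Str.len w + 1 := by
  have : (0 : Int) ≤ PySem.Str.len w := by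
    simp [PySem.Str.len_eq]
  omega

theorem map_len_ge_one (ws : List String) : ∀ y ∈ ws.map (fun w => PySem.Str.len w + 1), 1 ≤ y := by
  intro y hy
  simp only [List.mem_map] at hy
  obtain ⟨w, _, rfl⟩ := hy
  exact len_ge_one w

-- A's loop with a nonempty tail: it appends the affordable prefix of ws
theorem tailLoopA_ne (budget : Int) (ws : List String) :
    ∀ (tl : List String) (total : Int), tl ≠ [] →
    tailLoopA budget ws tl total =
      tl ++ ws.take ((accumB (total + 1) (ws.map (fun w => PySem.Str.len w + 1))).countP
        (fun c => decide (c ≤ budget + 1))) := by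
  induction ws with
  | nil => intro tl total _; simp [tailLoopA]
  | cons w ws ih =>
    intro tl total htl
    rw [List.map_cons, countP_accumB_cons (budget + 1) (total + 1) _ _ (map_len_ge_one ws)]
    simp only [tailLoopA, if_neg htl]
    by_cases h : budget < total + (PySem.Str.len w + 1)
    · rw [if_pos h, if_neg (show ¬ (total + 1 + (PySem.Str.len w + 1) ≤ budget + 1) by omega)]
      simp
    · rw [if_neg h, if_pos (show total + 1 + (PySem.Str.len w + 1) ≤ budget + 1 by omega)]
      rw [ih (tl ++ [w]) (total + (PySem.Str.len w + 1)) (by simp)]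
      have ht : total + (PySem.Str.len w + 1) + 1 = total + 1 + (PySem.Str.len w + 1) := by ring
      rw [ht]
      set m := (accumB (total + 1 + (PySem.Str.len w + 1)) (ws.map (fun w => PySem.Str.len w + 1))).countP
        (fun c => decide (c ≤ budget + 1)) with hm
      have h1m : 1 + m = m + 1 := Nat.add_comm 1 m
      rw [h1m, List.take_succ_cons]
      simp
theorem countP_accumB_le (a : Int) (l : List Int) (p : Int → Bool) :
    (accumB a l).countP p ≤ l.length := by
  have := List.countP_le_length (l := accumB a l) (p := p)
  simpa [accumB_length] using this

-- the core identity, stated over the reversed list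
theorem main_rev (rws : List String) (budget : Int) :
    (tailLoopA budget rws [] 0).reverse =
      rws.reverse.drop (rws.length -
        (accumB 0 (rws.map (fun w => PySem.Str.len w + 1))).countP (fun c => decide (c ≤ budget + 1))) := by
  cases rws with
  | nil => simp [tailLoopA, accumB]
  | cons w ws =>
    rw [List.map_cons, countP_accumB_cons (budget + 1) 0 _ _ (map_len_ge_one ws)]
    simp only [tailLoopA, if_true, List.nil_append]
    by_cases h : budget < 0 + (PySem.Str.len w + 0)
    · -- w not affordable: loop breaks with [], count 0
      rw [if_pos h, if_neg (show ¬ (0 + (PySem.Str.len w + 1) ≤ budget + 1) by omega)]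
      simp
    · -- w taken
      rw [if_neg h, if_pos (show 0 + (PySem.Str.len w + 1) ≤ budget + 1 by omega)]
      rw [tailLoopA_ne budget ws [w] (0 + (PySem.Str.len w + 0)) (by simp)]
      set m := (accumB (0 + (PySem.Str.len w + 0) + 1) (ws.map (fun w => PySem.Str.len w + 1))).countP
        (fun c => decide (c ≤ budget + 1)) with hm
      have hacc : 0 + (PySem.Str.len w + 1) = 0 + (PySem.Str.len w + 0) + 1 := by ring
      rw [hacc]
      have hmle : m ≤ ws.length := by
        simpa [hm] using countP_accumB_le (0 + (PySem.Str.len w + 0) + 1)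
          (ws.map (fun w => PySem.Str.len w + 1)) (fun c => decide (c ≤ budget + 1))
      have hlen : (w :: ws).length - (1 + m) = ws.length - m := by
        simp [List.length_cons]; omega
    -- (w::ws).reverse = ws.reverse ++ [w]; drop stays inside ws.reverse since ws.length - m ≤ ws.length
      rw [hlen]
      have hdrop : (w :: ws).reverse.drop (ws.length - m) = ws.reverse.drop (ws.length - m) ++ [w] := by
        rw [List.reverse_cons, List.drop_append_of_le_length (by simp)]
      rw [hdrop, List.reverse_append, List.reverse_singleton]
      congr 1
      -- (take m).reverse = reverse.drop (length - m)
      exact List.reverse_take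

-- ===== VERDICT (by name: the statement is the Claim_ definition above) =====
theorem tail_words_by_chars_py_spec : Claim_equal_tail_words_by_chars_py := by
  intro words budget _
  unfold Spec_tail_words_by_chars_py tail_words_by_chars_py
  have h := main_rev words.reverse budget
  rw [List.reverse_reverse] at h
  rw [h]
  have halt : tail_words_by_chars_py_alt words budget =
      PySem.List.slice words (some ((words.length : Int) -
        (((accumB 0 (words.reverse.map fun w => PySem.Str.len w + 1)).countP
          fun c => decide (c ≤ budget + 1)) : Int))) none := rfl
  rw [halt]
  have hk : (accumB 0 (words.reverse.map fun w => PySem.Str.len w + 1)).countP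
      (fun c => decide (c ≤ budget + 1)) ≤ words.length := by
    have := countP_accumB_le 0 (words.reverse.map fun w => PySem.Str.len w + 1)
      (fun c => decide (c ≤ budget + 1))
    simpa using this
  set k := (accumB 0 (words.reverse.map fun w => PySem.Str.len w + 1)).countP
      (fun c => decide (c ≤ budget + 1)) with hkdef
  have hcast : ((words.length : Int) - (k : Int)) = ((words.length - k : Nat) : Int) := by omega
  rw [hcast, PySem.List.slice_from_natCast]
  simp
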